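-- pv_equiv track=rewrite | github.com/kinnminchan/minchan-pyquiz | THE WHITE - Week 05/[+EX]/w05ex_question.py | func
-- ===== SOURCE A (Python) =====
-- def func(nums, i):
--     total = 0
--     for j in range(i, len(nums)):
--         if j % 2 == 1:
--             total += nums[j] // 2
--         else:
--             total += nums[j]
--     return total
-- ===== SOURCE B (Python) =====
-- def func(nums, i):
--     start = max(i, 0)
--     total = 0
--     if start % 2 == 1 and start < len(nums):
--         total = nums[start] // 2
--         start += 1
--     k = start
--     while k + 1 < len(nums):
--         total += nums[k] + nums[k + 1] // 2
--         k += 2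
--     if k < len(nums):
--         total += nums[k]
--     return total
-- ===== Notes on version B (the rewrite author's own statement) =====
-- stated objective: alternative
-- what changed: B replaces A's single index loop with a per-element parity test by a start normalised to an even index followed by a two-elements-per-step pair loop (whole element plus halved neighbour) with no conditional in the loop body.
-- intended difference: For -len(nums) <= i < 0 A wraps the negative indices and adds the last -i elements again (with parity taken from the negative index) on top of the whole-list sum, double-counting them; B clamps the start to 0 and returns the plain whole-list sum, the intended value for a start before the list. — e.g. on func([2, 3], -1): A returns 4, B returns 3
import Mathlib
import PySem

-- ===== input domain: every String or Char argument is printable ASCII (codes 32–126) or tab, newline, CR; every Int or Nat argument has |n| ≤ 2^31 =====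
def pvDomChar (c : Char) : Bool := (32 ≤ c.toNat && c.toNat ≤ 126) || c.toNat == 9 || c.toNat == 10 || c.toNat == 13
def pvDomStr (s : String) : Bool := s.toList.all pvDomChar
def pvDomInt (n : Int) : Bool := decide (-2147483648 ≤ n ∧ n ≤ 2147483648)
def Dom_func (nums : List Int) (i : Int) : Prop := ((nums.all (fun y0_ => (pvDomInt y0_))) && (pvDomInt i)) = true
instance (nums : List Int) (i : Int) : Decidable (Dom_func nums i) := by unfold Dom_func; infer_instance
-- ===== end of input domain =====

-- B reorganises the loop: it normalises the start to an even index, then consumes the list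
-- two elements per step (whole element + halved element) with no per-element parity test;
-- objective: alternative decomposition (same O(n) cost). Return value only; neither mutates.

-- ===== PORT A =====
def func (nums : List Int) (i : Int) : Int :=
  (PySem.List.pyRange i (nums.length : Int) 1).foldl
    (fun total j =>
      if PySem.Int.mod j 2 = 1 then
        total + PySem.Int.floordiv (PySem.List.pyGetD nums j 0) 2
      else
        total + PySem.List.pyGetD nums j 0) 0

-- ===== PORT B =====
-- the `while k + 1 < len(nums)` loop of Source B plus its trailing `if k < len(nums)` step;
-- the Nat `fuel` only bounds the iteration count (nums.length + 1 always suffices)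
def pairLoop (nums : List Int) : Nat → Int → Int → Int
  | 0, _, total => total
  | fuel + 1, k, total =>
    if k + 1 < (nums.length : Int) then
      pairLoop nums fuel (k + 2)
        (total + (PySem.List.pyGetD nums k 0 + PySem.Int.floordiv (PySem.List.pyGetD nums (k + 1) 0) 2))
    else if k < (nums.length : Int) then
      total + PySem.List.pyGetD nums k 0
    else
      total

def func_alt (nums : List Int) (i : Int) : Int :=
  let start := max i 0
  if PySem.Int.mod start 2 = 1 ∧ start < (nums.length : Int) then
    pairLoop nums (nums.length + 1) (start + 1) (PySem.Int.floordiv (PySem.List.pyGetD nums start 0) 2)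
  else
    pairLoop nums (nums.length + 1) start 0

-- ===== PRECONDITION & SPEC =====
-- Pre_ excludes i < -len(nums), where A's range reaches an index below -len and nums[j] raises IndexError.
def Pre_func (nums : List Int) (i : Int) : Prop := -(nums.length : Int) ≤ i
instance (nums : List Int) (i : Int) : Decidable (Pre_func nums i) := by unfold Pre_func; infer_instance
def pvWitness_func : List Int × Int := ([3, 4, 5], 1)

-- For -len(nums) ≤ i < 0, A wraps the negative indices, so on top of the full-list sum it adds
-- the last -i elements again with parity taken from the negative index (double-counting); B clamps
-- the start to 0 and returns the plain whole-list sum, the intended value for a start before the list.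
def D_func (nums : List Int) (i : Int) : Prop := i < 0
instance (nums : List Int) (i : Int) : Decidable (D_func nums i) := by unfold D_func; infer_instance

def Spec_func (nums : List Int) (i : Int) (out : Int) : Prop := ¬ D_func nums i → out = func_alt nums i
instance (nums : List Int) (i : Int) (out : Int) : Decidable (Spec_func nums i out) := by unfold Spec_func; infer_instance

def pvDiffWitness_func : List Int × Int := ([2, 3], -1)
def pvDiffWitnessOut_func : Int × Int := (4, 3)

-- ===== CLAIM (what is proved, stated in full; the proofs are below) =====
def Claim_unchanged_func : Prop := ∀ (nums : List Int) (i : Int), Dom_func nums i → Pre_func nums i → Spec_func nums i (func nums i)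
def Claim_changed_func : Prop := Dom_func (pvDiffWitness_func.1) (pvDiffWitness_func.2) ∧ Pre_func (pvDiffWitness_func.1) (pvDiffWitness_func.2) ∧ D_func (pvDiffWitness_func.1) (pvDiffWitness_func.2) ∧ func (pvDiffWitness_func.1) (pvDiffWitness_func.2) = pvDiffWitnessOut_func.1 ∧ func_alt (pvDiffWitness_func.1) (pvDiffWitness_func.2) = pvDiffWitnessOut_func.2 ∧ pvDiffWitnessOut_func.1 ≠ pvDiffWitnessOut_func.2

-- ===== LEMMAS AND PROOFS =====

-- A's fold, started at an even index k ≥ 0, computes exactly B's pair loop.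
lemma afold_eq_pairLoop (nums : List Int) :
    ∀ (fuel : Nat) (k total : Int), ((nums.length : Int) - k).toNat < fuel → 0 ≤ k → k % 2 = 0 →
    (PySem.List.pyRange k (nums.length : Int) 1).foldl
      (fun total j =>
        if PySem.Int.mod j 2 = 1 then
          total + PySem.Int.floordiv (PySem.List.pyGetD nums j 0) 2
        else
          total + PySem.List.pyGetD nums j 0) total
      = pairLoop nums fuel k total := by
  intro fuel
  induction fuel with
  | zero =>
    intro k total hf h0 h2
    omega
  | succ n ih =>
    intro k total hf h0 h2
    have m1 : PySem.Int.mod k 2 = k % 2 := PySem.Int.mod_eq_emod_of_pos (by norm_num)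
    have m2 : PySem.Int.mod (k + 1) 2 = (k + 1) % 2 := PySem.Int.mod_eq_emod_of_pos (by norm_num)
    by_cases h1 : k + 1 < (nums.length : Int)
    · rw [PySem.List.pyRange_one_cons (by omega), PySem.List.pyRange_one_cons h1,
          List.foldl_cons, List.foldl_cons]
      simp only [m1, m2]
      rw [if_pos (show (k + 1) % 2 = 1 by omega), if_neg (show ¬ k % 2 = 1 by omega)]
      rw [show k + 1 + 1 = k + 2 from by ring,
          ih (k + 2) _ (by omega) (by omega) (by omega)]
      conv_rhs => rw [pairLoop]
      rw [if_pos h1]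
      congr 1
      ring
    · by_cases hk : k < (nums.length : Int)
      · rw [PySem.List.pyRange_one_cons hk, PySem.List.pyRange_one_eq_nil (by omega),
            List.foldl_cons, List.foldl_nil, if_neg (by rw [m1]; omega),
            pairLoop, if_neg h1, if_pos hk]
      · rw [PySem.List.pyRange_one_eq_nil (by omega), List.foldl_nil,
            pairLoop, if_neg h1, if_neg hk]

theorem func_spec : Claim_unchanged_func := by
  intro nums i _ hpre hnd
  unfold D_func at hnd
  have hi : (0 : Int) ≤ i := by omega
  have m1 : PySem.Int.mod i 2 = i % 2 := PySem.Int.mod_eq_emod_of_pos (by norm_num)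
  unfold func func_alt
  simp only [max_eq_left hi]
  by_cases hodd : i % 2 = 1
  · by_cases hlen : i < (nums.length : Int)
    · rw [if_pos ⟨by rw [m1]; exact hodd, hlen⟩,
          PySem.List.pyRange_one_cons hlen, List.foldl_cons,
          if_pos (by rw [m1]; exact hodd),
          afold_eq_pairLoop nums (nums.length + 1) (i + 1) _
            (by omega) (by omega) (by omega)]
      congr 1
      ring
    · rw [if_neg (by omega), PySem.List.pyRange_one_eq_nil (by omega), List.foldl_nil,
          pairLoop, if_neg (by omega), if_neg (by omega)]
  · rw [if_neg (by rw [m1]; omega),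
        afold_eq_pairLoop nums (nums.length + 1) i 0 (by omega) hi (by omega)]

theorem func_changed : Claim_changed_func := by
  unfold Claim_changed_func; decide
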